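-- pv_equiv track=rewrite | github.com/vinodadari/coding_problems | outer_problems/max_most_three_tiles.py | get_max_elements
-- ===== SOURCE A (Python) =====
-- def get_max_elements(A: list):
--     max_elements = []
--     for i in range(0, len(A)):
--         max_num = max(A)
--         if max_num not in max_elements:
--             max_elements.append(max_num)
--             A.remove(max_num)
--         else:
--             is_repetative_more_than_two = (
--                 True if 2 < max_elements.count(max_num) else False
--             )
--             if is_repetative_more_than_two is False:
--                 max_elements.append(max_num)
--                 A.remove(max_num)
--         if 6 <= len(max_elements):
--             return max_elements
--     return max_elements
-- ===== SOURCE B (Python) =====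
-- def get_max_elements(A: list):
--     res = []
--     prev = None
--     run = 0
--     for x in sorted(A, reverse=True):
--         run = run + 1 if x == prev else 1
--         prev = x
--         if run > 3:
--             break
--         res.append(x)
--         if len(res) == 6:
--             break
--     return res
-- ===== Notes on version B (the rewrite author's own statement) =====
-- stated objective: faster
-- what changed: B sorts the list descending once and replays the cap-3-per-value / halt-on-4th-duplicate / 6-element-limit rules in a single linear scan, instead of A's repeated max()+remove() passes over the shrinking list.
import Mathlib
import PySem

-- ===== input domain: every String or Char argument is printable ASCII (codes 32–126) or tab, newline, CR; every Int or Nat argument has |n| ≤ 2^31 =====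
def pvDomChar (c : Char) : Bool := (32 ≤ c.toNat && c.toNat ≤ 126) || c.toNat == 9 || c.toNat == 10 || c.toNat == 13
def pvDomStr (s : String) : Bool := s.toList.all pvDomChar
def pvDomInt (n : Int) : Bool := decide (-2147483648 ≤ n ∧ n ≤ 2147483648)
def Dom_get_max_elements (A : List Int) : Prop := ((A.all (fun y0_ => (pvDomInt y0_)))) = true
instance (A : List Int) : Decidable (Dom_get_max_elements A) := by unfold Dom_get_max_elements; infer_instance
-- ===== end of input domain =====

-- B replaces A's repeated max(A)+remove scans by one descending sort and a single
-- linear replay of the cap-3 / halt / 6-limit rules (objective: faster).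
-- A mutates its argument list (A.remove); B does not — the equivalence proved here is about the return value only.

-- ===== PORT A =====
-- one iteration of A's 'for i in range(0, len(A))' loop; fuel = number of remaining iterations
def getMaxLoop : Nat → List Int → List Int → List Int
  | 0, acc, _ => acc
  | fuel+1, acc, lst =>
    match PySem.List.max? lst (fun y => y) with
    | none => acc   -- Python max([]) would raise; unreachable from get_max_elements (fuel = |lst| at entry)
    | some max_num =>
      let st :=
        if max_num ∈ acc then
          let is_repetative_more_than_two := if 2 < PySem.List.count acc max_num then true else false
          if is_repetative_more_than_two = false then
            (acc ++ [max_num], (PySem.List.remove? lst max_num).getD lst)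
          else (acc, lst)
        else
          (acc ++ [max_num], (PySem.List.remove? lst max_num).getD lst)
      if 6 ≤ st.1.length then st.1
      else getMaxLoop fuel st.1 st.2

def get_max_elements (A : List Int) : List Int := getMaxLoop A.length [] A

-- ===== PORT B =====
-- scan of sorted(A, reverse=True) with state (prev, run, res)
def scanTop : Option Int → Nat → List Int → List Int → List Int
  | _, _, res, [] => res
  | prev, run, res, x :: xs =>
    let run' := if some x = prev then run + 1 else 1
    if 3 < run' then res
    else
      let res' := res ++ [x]
      if res'.length = 6 then res' else scanTop (some x) run' res' xs

def get_max_elements_alt (A : List Int) : List Int :=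
  scanTop none 0 [] (PySem.List.sorted A (fun y => y) true)

-- ===== PRECONDITION & SPEC =====
def Spec_get_max_elements (A : List Int) (out : List Int) : Prop := out = get_max_elements_alt A
instance (A : List Int) (out : List Int) : Decidable (Spec_get_max_elements A out) := by unfold Spec_get_max_elements; infer_instance

-- ===== CLAIM (what is proved, stated in full; the proofs are below) =====
def Claim_equal_get_max_elements : Prop := ∀ (A : List Int), Dom_get_max_elements A → Spec_get_max_elements A (get_max_elements A)

-- ===== LEMMAS AND PROOFS =====

-- max(A) depends only on the multiset of A
theorem pvMax?_perm (l l' : List Int) (h : l.Perm l') :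
    PySem.List.max? l (fun y => y) = PySem.List.max? l' (fun y => y) := by
  cases hl : PySem.List.max? l (fun y => y) with
  | none =>
      have : l = [] := (PySem.List.max?_eq_none_iff l (fun y => y)).1 hl
      subst this
      have : l' = [] := h.symm.eq_nil
      rw [this]
      exact hl.symm
  | some m =>
      cases hr : PySem.List.max? l' (fun y => y) with
      | none =>
          have : l' = [] := (PySem.List.max?_eq_none_iff l' (fun y => y)).1 hr
          subst this
          have hnil : l = [] := h.eq_nil
          rw [hnil, (PySem.List.max?_eq_none_iff ([] : List Int) (fun y => y)).2 rfl] at hl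
          cases hl
      | some m' =>
          have hm : m ∈ l := PySem.List.max?_mem hl
          have hm' : m' ∈ l' := PySem.List.max?_mem hr
          have h1 : m ≤ m' := PySem.List.max?_isMax hr m (h.mem_iff.1 hm)
          have h2 : m' ≤ m := PySem.List.max?_isMax hl m' (h.symm.mem_iff.1 hm')
          have : m = m' := le_antisymm h1 h2
          simp [this]

-- A's whole loop depends only on the multiset of the working list
theorem getMaxLoop_perm : ∀ (fuel : Nat) (acc l l' : List Int), l.Perm l' →
    getMaxLoop fuel acc l = getMaxLoop fuel acc l' := by
  intro fuel
  induction fuel with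
  | zero => intro acc l l' _; rfl
  | succ n ih =>
      intro acc l l' h
      show getMaxLoop (n+1) acc l = getMaxLoop (n+1) acc l'
      rw [getMaxLoop, getMaxLoop, pvMax?_perm l l' h]
      cases hm : PySem.List.max? l' (fun y => y) with
      | none => rfl
      | some m =>
          have hmem' : m ∈ l' := PySem.List.max?_mem hm
          have hmem : m ∈ l := h.mem_iff.2 hmem'
          have hrem : (PySem.List.remove? l m).getD l = l.erase m := by
            rw [PySem.List.remove?_eq_some_erase l m hmem]; rfl
          have hrem' : (PySem.List.remove? l' m).getD l' = l'.erase m := by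
            rw [PySem.List.remove?_eq_some_erase l' m hmem']; rfl
          have herase : (l.erase m).Perm (l'.erase m) := h.erase m
          simp only [hrem, hrem']
          by_cases hin : m ∈ acc
          · by_cases hc : 2 < PySem.List.count acc m
            · have hcL : ¬ List.count m acc ≤ 2 := by
                have h' := hc; rw [PySem.List.count_eq] at h'; omega
              simp [hin, hcL]
              split_ifs with h6
              · rfl
              · exact ih _ _ _ h
            · have hcL : List.count m acc ≤ 2 := by
                have h' := hc; rw [PySem.List.count_eq] at h'; omega
              simp [hin, hcL]
              split_ifs with h6
              · rfl
              · exact ih _ _ _ herase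
          · simp [hin]
            split_ifs with h6
            · rfl
            · exact ih _ _ _ herase

-- once the current max has 3 copies in acc, the remaining iterations do nothing
theorem getMaxLoop_stall : ∀ (fuel : Nat) (acc l : List Int) (m : Int),
    PySem.List.max? l (fun y => y) = some m → 2 < PySem.List.count acc m →
    getMaxLoop fuel acc l = acc := by
  intro fuel
  induction fuel with
  | zero => intro acc l m _ _; rfl
  | succ n ih =>
      intro acc l m hm hc
      have hin : m ∈ acc := by
        have : 0 < PySem.List.count acc m := by omega
        simpa [PySem.List.count_eq, List.count_pos_iff] using this
      rw [getMaxLoop, hm]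
      have hcL : ¬ List.count m acc ≤ 2 := by
        have h' := hc; rw [PySem.List.count_eq] at h'; omega
      simp [hin, hcL]
      intro _
      exact ih acc l m hm hc

theorem foldl_max_of_le (x : Int) : ∀ (t : List Int), (∀ b ∈ t, b ≤ x) → t.foldl max x = x := by
  intro t
  induction t generalizing x with
  | nil => intro _; rfl
  | cons b t ih =>
      intro h
      have hb : b ≤ x := h b (by simp)
      have : max x b = x := max_eq_left hb
      simp only [List.foldl_cons, this]
      exact ih x (fun c hc => h c (by simp [hc]))

-- the head of a descending-sorted list is what Python's max picks
theorem max?_of_sorted_head (x : Int) (xs : List Int) (h : ∀ b ∈ xs, b ≤ x) :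
    PySem.List.max? (x :: xs) (fun y => y) = some x := by
  rw [PySem.List.max?_id_cons, foldl_max_of_le x xs h]

-- one productive iteration of A: the current max joins acc and leaves the list
theorem getMaxLoop_succ_take (n : Nat) (acc lst : List Int) (m : Int)
    (hm : PySem.List.max? lst (fun y => y) = some m)
    (hcle : PySem.List.count acc m ≤ 2) :
    getMaxLoop (n+1) acc lst =
      (if 6 ≤ (acc ++ [m]).length then acc ++ [m]
       else getMaxLoop n (acc ++ [m]) ((PySem.List.remove? lst m).getD lst)) := by
  rw [getMaxLoop, hm]
  by_cases hin : m ∈ acc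
  · have hcL : List.count m acc ≤ 2 := by
      have h' := hcle; rw [PySem.List.count_eq] at h'; omega
    simp [hin, hcL]
  · simp [hin]

-- main correspondence: on a descending list, A's loop is B's linear scan
theorem loop_eq_scan : ∀ (l acc : List Int) (prev : Option Int) (run : Nat),
    l.Pairwise (fun a b => b ≤ a) →
    acc.length < 6 →
    (∀ x, l.head? = some x → PySem.List.count acc x = (if some x = prev then run else 0)) →
    (∀ a ∈ acc, ∀ b ∈ l, b ≤ a) →
    getMaxLoop l.length acc l = scanTop prev run acc l := by
  intro l
  induction l with
  | nil => intro acc prev run _ _ _ _; rfl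
  | cons x xs ih =>
      intro acc prev run hsorted hlen hcount horder
      have hxs_le : ∀ b ∈ xs, b ≤ x := by
        intro b hb; exact (List.pairwise_cons.1 hsorted).1 b hb
      have hmax : PySem.List.max? (x :: xs) (fun y => y) = some x := max?_of_sorted_head x xs hxs_le
      have hcx : PySem.List.count acc x = (if some x = prev then run else 0) := hcount x rfl
      show getMaxLoop (xs.length + 1) acc (x :: xs) = scanTop prev run acc (x :: xs)
      by_cases hrun : 3 < (if some x = prev then run + 1 else 1)
      · -- halt case: run' > 3, so prev = some x and count acc x = run ≥ 3
        have hpx : some x = prev := by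
          by_contra hne; rw [if_neg hne] at hrun; omega
        have hc2 : 2 < PySem.List.count acc x := by
          rw [if_pos hpx] at hrun
          rw [hcx, if_pos hpx]; omega
        rw [getMaxLoop_stall (xs.length + 1) acc (x :: xs) x hmax hc2]
        simp [scanTop, hrun]
      · -- take case: run' ≤ 3, so count acc x ≤ 2, A appends x and removes it
        have hcle : PySem.List.count acc x ≤ 2 := by
          rw [hcx]
          by_cases hpx : some x = prev
          · rw [if_pos hpx]; rw [if_pos hpx] at hrun; omega
          · rw [if_neg hpx]; omega
        have hrem : (PySem.List.remove? (x :: xs) x).getD (x :: xs) = xs := by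
          rw [PySem.List.remove?_cons_self]; rfl
        rw [getMaxLoop_succ_take xs.length acc (x :: xs) x hmax hcle, hrem]
        simp only [scanTop, hrun, if_false]
        have hlen' : (acc ++ [x]).length = acc.length + 1 := by simp
        by_cases h6 : 6 ≤ (acc ++ [x]).length
        · rw [if_pos h6, if_pos (by omega : (acc ++ [x]).length = 6)]
        · rw [if_neg h6, if_neg (by omega : ¬ (acc ++ [x]).length = 6)]
          -- recurse: apply the IH with the new state
          apply ih (acc ++ [x]) (some x) (if some x = prev then run + 1 else 1)
          · exact (List.pairwise_cons.1 hsorted).2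
          · omega
          · intro y hy
            have hyx : y ∈ xs := by
              cases xs with
              | nil => simp at hy
              | cons z zs => simp at hy; subst hy; simp
            by_cases hxy : y = x
            · subst hxy
              rw [if_pos rfl]
              have hcx' : List.count y acc = if some y = prev then run else 0 := by
                rw [← PySem.List.count_eq]; exact hcx
              simp only [PySem.List.count_eq, List.count_append]
              have hx1 : List.count y [y] = 1 := by simp
              by_cases hpx : some y = prev
              · rw [if_pos hpx] at hcx' ⊢; omega
              · rw [if_neg hpx] at hcx' ⊢; omega
            · have hylt : y < x := lt_of_le_of_ne (hxs_le y hyx) hxy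
              have hynacc : y ∉ acc := by
                intro hmem
                have : x ≤ y := horder y hmem x (by simp)
                omega
              have hne' : ¬ (some y = some x) := by simp [hxy]
              rw [if_neg hne']
              simp only [PySem.List.count_eq, List.count_append]
              have h1 : List.count y acc = 0 := List.count_eq_zero.2 hynacc
              have h2 : List.count y [x] = 0 := by
                simp [show x ≠ y from fun hq => hxy hq.symm]
              omega
          · intro a ha b hb
            rcases List.mem_append.1 ha with h1 | h1
            · exact horder a h1 b (by simp [hb])
            · simp at h1; subst h1; exact hxs_le b hb

-- ===== VERDICT (by name: the statement is the Claim_ definition above) =====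
theorem get_max_elements_spec : Claim_equal_get_max_elements := by
  intro A _
  show get_max_elements A = get_max_elements_alt A
  unfold get_max_elements get_max_elements_alt
  set s := PySem.List.sorted A (fun y => y) true with hs
  have hperm : A.Perm s := (PySem.List.sorted_perm A (fun y => y) true).symm
  have hlen : A.length = s.length := hperm.length_eq
  rw [getMaxLoop_perm A.length [] A s hperm, hlen]
  apply loop_eq_scan s [] none 0
  · exact PySem.List.sorted_pairwise_rev A (fun y => y)
  · simp
  · intro x _; simp [PySem.List.count_eq]
  · intro a ha; simp at ha
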